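-- pv_equiv track=rewrite | github.com/AeronPanta11/AI-lab | lab_1/lab4.py | primecalc
-- ===== SOURCE A (Python) =====
-- def primecalc(n1,n2):
--
--     b=[]
--     for i in range (n1,n2):
--         a=1
--         for j in range (1,int(i/2)):
--             if i%(j+1)==0:
--                 a=0
--                 continue
--         if a==1:
--             b.append(i)
--
--     return b
-- ===== SOURCE B (Python) =====
-- def primecalc(n1, n2):
--     # trial division only up to sqrt(i), with early exit
--     out = []
--     for i in range(n1, n2):
--         d = 2
--         isp = True
--         while d * d <= i:
--             if i % d == 0:
--                 isp = False
--                 break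
--             d += 1
--         if isp:
--             out.append(i)
--     return out
-- ===== Notes on version B (the rewrite author's own statement) =====
-- stated objective: alternative
-- what changed: B replaces A's exhaustive scan of all candidate divisors up to i/2 (flag set by a full inner for-loop with no early exit) with a while-loop trial division bounded by d*d <= i that breaks at the first divisor found.
import Mathlib
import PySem

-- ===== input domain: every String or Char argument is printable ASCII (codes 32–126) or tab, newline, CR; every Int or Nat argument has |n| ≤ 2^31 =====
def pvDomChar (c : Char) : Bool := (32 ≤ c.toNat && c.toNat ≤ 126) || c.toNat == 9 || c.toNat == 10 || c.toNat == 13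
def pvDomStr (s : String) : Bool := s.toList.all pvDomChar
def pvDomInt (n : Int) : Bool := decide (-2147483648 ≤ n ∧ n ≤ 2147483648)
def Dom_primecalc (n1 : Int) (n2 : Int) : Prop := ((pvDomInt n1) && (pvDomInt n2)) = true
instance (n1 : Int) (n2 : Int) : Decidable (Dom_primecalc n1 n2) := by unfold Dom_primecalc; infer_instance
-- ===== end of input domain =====

-- B replaces A's full scan of divisors 2..i/2 by sqrt-bounded trial division with early exit (alternative algorithm; same observable results).

-- ===== PORT A =====
-- 'int(i/2)' truncates toward zero: exact as Int.tdiv for |i| ≤ 2^31 (< 2^53, so the float is exact)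
def primecalc (n1 : Int) (n2 : Int) : List Int :=
  (PySem.List.pyRange n1 n2 1).foldl (fun b i =>
    let a : Int :=
      (PySem.List.pyRange 1 (Int.tdiv i 2) 1).foldl
        (fun a j => if PySem.Int.mod i (j + 1) = 0 then 0 else a) 1
    if a = 1 then b ++ [i] else b) []

-- ===== PORT B =====
-- 'while d*d <= i: if i % d == 0: break; d += 1' — terminates since d starts at 2 and d*d ≤ i forces d < i
def trialDiv (i : Int) (d : Int) (h : 2 ≤ d) : Bool :=
  if hd : d * d ≤ i then
    if PySem.Int.mod i d = 0 then false
    else trialDiv i (d + 1) (by omega)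
  else true
termination_by (i - d).toNat
decreasing_by
  have : 2 * d ≤ d * d := by nlinarith
  omega

def primecalc_alt (n1 : Int) (n2 : Int) : List Int :=
  (PySem.List.pyRange n1 n2 1).foldl (fun out i =>
    if trialDiv i 2 (by omega) then out ++ [i] else out) []

-- ===== PRECONDITION & SPEC =====
def Spec_primecalc (n1 : Int) (n2 : Int) (out : List Int) : Prop := out = primecalc_alt n1 n2
instance (n1 : Int) (n2 : Int) (out : List Int) : Decidable (Spec_primecalc n1 n2 out) := by unfold Spec_primecalc; infer_instance

-- ===== CLAIM (what is proved, stated in full; the proofs are below) =====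
def Claim_equal_primecalc : Prop := ∀ (n1 : Int) (n2 : Int), Dom_primecalc n1 n2 → Spec_primecalc n1 n2 (primecalc n1 n2)

-- ===== LEMMAS AND PROOFS =====

-- A's inner flag loop: result 1 ↔ no element of the list satisfies the test
theorem flag_foldl_zero (l : List Int) (p : Int → Bool) :
    l.foldl (fun a j => if p j then (0 : Int) else a) 0 = 0 := by
  induction l with
  | nil => rfl
  | cons x xs ih => simp only [List.foldl]; split <;> exact ih

theorem flag_foldl_eq_one (l : List Int) (p : Int → Bool) :
    (l.foldl (fun a j => if p j then (0 : Int) else a) 1 = 1) ↔ ∀ j ∈ l, p j = false := by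
  induction l with
  | nil => simp
  | cons x xs ih =>
    simp only [List.foldl, List.mem_cons]
    by_cases hx : p x
    · simp [hx, flag_foldl_zero]
    · simp [hx, ih]

-- A's per-element condition, as a universally quantified statement
theorem condA_iff (i : Int) :
    ((PySem.List.pyRange 1 (Int.tdiv i 2) 1).foldl
        (fun a j => if PySem.Int.mod i (j + 1) = 0 then (0 : Int) else a) 1 = 1)
      ↔ ∀ d : Int, 2 ≤ d → d ≤ Int.tdiv i 2 → ¬ d ∣ i := by
  rw [show (fun a j => if PySem.Int.mod i (j + 1) = 0 then (0 : Int) else a)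
        = (fun a j => if (decide (PySem.Int.mod i (j + 1) = 0)) = true then (0 : Int) else a) by
      funext a j; simp]
  rw [flag_foldl_eq_one]
  constructor
  · intro h d h2 hle hdvd
    have hj := h (d - 1) (by rw [PySem.List.mem_pyRange_one]; omega)
    simp only [decide_eq_false_iff_not] at hj
    apply hj
    rw [show d - 1 + 1 = d by ring, PySem.Int.mod_eq_zero_iff_dvd]
    exact hdvd
  · intro h j hj
    rw [PySem.List.mem_pyRange_one] at hj
    simp only [decide_eq_false_iff_not]
    rw [PySem.Int.mod_eq_zero_iff_dvd]
    exact h (j + 1) (by omega) (by omega)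

-- B's while loop: characterisation
theorem trialDiv_iff (i : Int) (d : Int) (h : 2 ≤ d) :
    trialDiv i d h = true ↔ ∀ e : Int, d ≤ e → e * e ≤ i → ¬ e ∣ i := by
  fun_induction trialDiv i d h with
  | case1 d h hd hmod =>
    simp only [Bool.false_eq_true, false_iff, not_forall]
    rw [PySem.Int.mod_eq_zero_iff_dvd] at hmod
    exact ⟨d, le_refl d, hd, by simpa using hmod⟩
  | case2 d h hd hmod ih =>
    rw [ih]
    constructor
    · intro hall e hde hee hdvd
      rcases eq_or_lt_of_le hde with rfl | hlt
      · rw [PySem.Int.mod_eq_zero_iff_dvd] at hmod; exact hmod hdvd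
      · exact hall e (by omega) hee hdvd
    · intro hall e hde hee hdvd
      exact hall e (by omega) hee hdvd
  | case3 d h hd =>
    simp only [true_iff]
    intro e hde hee hdvd
    have : d * d ≤ e * e := mul_le_mul hde hde (by omega) (by omega)
    omega

-- the number-theoretic core: for i ≥ 4, a divisor in [2, i/2] exists iff one with d*d ≤ i exists
theorem div_bound_iff (i : Int) (hi : 4 ≤ i) :
    (∀ d : Int, 2 ≤ d → d ≤ Int.tdiv i 2 → ¬ d ∣ i)
      ↔ ∀ d : Int, 2 ≤ d → d * d ≤ i → ¬ d ∣ i := by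
  have htd : Int.tdiv i 2 = i / 2 := by
    rw [Int.tdiv_eq_ediv] ; omega
  constructor
  · intro h d h2 hdd hdvd
    apply h d h2 _ hdvd
    have : 2 * d ≤ d * d := by nlinarith
    omega
  · intro h d h2 hle hdvd
    obtain ⟨e, he⟩ := hdvd
    have hd0 : 0 < d := by omega
    have h2d : 2 * d ≤ i := by omega
    have he2 : 2 ≤ e := by nlinarith
    by_cases hdd : d * d ≤ i
    · exact h d h2 hdd ⟨e, he⟩
    · -- then e < d, so e*e < i and e divides i
      have hed : e < d := by nlinarith
      have : e * e ≤ i := by nlinarith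
      exact h e he2 this ⟨d, by linarith [he, mul_comm d e]⟩
  
-- pointwise agreement of the two per-element tests
theorem point_eq (i : Int) :
    (if ((PySem.List.pyRange 1 (Int.tdiv i 2) 1).foldl
          (fun a j => if PySem.Int.mod i (j + 1) = 0 then (0 : Int) else a) 1) = 1
       then true else false) = trialDiv i 2 (by omega) := by
  by_cases hi : 4 ≤ i
  · by_cases hA : ((PySem.List.pyRange 1 (Int.tdiv i 2) 1).foldl
        (fun a j => if PySem.Int.mod i (j + 1) = 0 then (0 : Int) else a) 1) = 1
    · rw [if_pos hA]
      symm
      rw [trialDiv_iff]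
      rw [condA_iff] at hA
      exact (div_bound_iff i hi).mp hA
    · rw [if_neg hA]
      symm
      rw [Bool.eq_false_iff, Ne, trialDiv_iff]
      intro hB
      exact hA ((condA_iff i).mpr ((div_bound_iff i hi).mpr hB))
  · -- i ≤ 3: both tests succeed
    have hA : ((PySem.List.pyRange 1 (Int.tdiv i 2) 1).foldl
        (fun a j => if PySem.Int.mod i (j + 1) = 0 then (0 : Int) else a) 1) = 1 := by
      rw [condA_iff]
      intro d h2 hle hdvd
      have htd : Int.tdiv i 2 ≤ 1 := by
        by_cases h0 : 0 ≤ i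
        · rw [Int.tdiv_eq_ediv] ; omega
        · have h1 : Int.tdiv i 2 = -(Int.tdiv (-i) 2) := by
            rw [Int.neg_tdiv, neg_neg]
          have h2 : Int.tdiv (-i) 2 = (-i) / 2 := by rw [Int.tdiv_eq_ediv] ; omega
          omega
      omega
    have hB : trialDiv i 2 (by omega) = true := by
      rw [trialDiv_iff]
      intro e he hee _
      nlinarith
    rw [if_pos hA, hB]

theorem primecalc_eq_alt (n1 n2 : Int) : primecalc n1 n2 = primecalc_alt n1 n2 := by
  unfold primecalc primecalc_alt
  simp only []
  rw [show (fun (b : List Int) i =>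
        if ((PySem.List.pyRange 1 (Int.tdiv i 2) 1).foldl
            (fun a j => if PySem.Int.mod i (j + 1) = 0 then (0 : Int) else a) 1) = 1
        then b ++ [i] else b)
      = (fun (b : List Int) i => if trialDiv i 2 (by omega) then b ++ [i] else b) by
    funext b i
    rw [← point_eq i]
    by_cases h : ((PySem.List.pyRange 1 (Int.tdiv i 2) 1).foldl
        (fun a j => if PySem.Int.mod i (j + 1) = 0 then (0 : Int) else a) 1) = 1 <;>
      simp [h]]

-- ===== VERDICT (by name: the statement is the Claim_ definition above) =====
theorem primecalc_spec : Claim_equal_primecalc := by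
  intro n1 n2 _
  unfold Spec_primecalc
  exact primecalc_eq_alt n1 n2
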